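-- pv_equiv track=rewrite | github.com/kenkov/lda | lda.py | mkdictionary
-- ===== SOURCE A (Python) =====
-- def mkdictionary(xs: [[str]]) -> {str: int}:
--     """
--     Return dictionary: {str: int}
--     """
--     _id = 0
--     dic = dict()
--     for line in xs:
--         for word in line:
--             if word not in dic:
--                 dic[word] = _id
--                 _id += 1
--     return dic
-- ===== SOURCE B (Python) =====
-- def mkdictionary(xs: [[str]]) -> {str: int}:
--     """
--     Return dictionary: {str: int}
--     """
--     # Stage 1: position index — map every word to its FIRST occurrence position
--     # by loading the (word, position) pairs in reverse, so the earliest wins.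
--     flat = [word for line in xs for word in line]
--     first = dict(reversed([(word, i) for i, word in enumerate(flat)]))
--     # Stage 2: rank the distinct words by that first-occurrence position.
--     order = sorted(first, key=first.get)
--     return {word: rank for rank, word in enumerate(order)}
-- ===== Notes on version B (the rewrite author's own statement) =====
-- stated objective: alternative
-- what changed: Instead of A's single fused loop with a membership guard and an incremental id counter, B computes each word's first-occurrence position by loading the reversed (word, position) pairs into a dict (earliest overwrites last), then sorts the distinct words by that position and numbers the sorted list.
import Mathlib
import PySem

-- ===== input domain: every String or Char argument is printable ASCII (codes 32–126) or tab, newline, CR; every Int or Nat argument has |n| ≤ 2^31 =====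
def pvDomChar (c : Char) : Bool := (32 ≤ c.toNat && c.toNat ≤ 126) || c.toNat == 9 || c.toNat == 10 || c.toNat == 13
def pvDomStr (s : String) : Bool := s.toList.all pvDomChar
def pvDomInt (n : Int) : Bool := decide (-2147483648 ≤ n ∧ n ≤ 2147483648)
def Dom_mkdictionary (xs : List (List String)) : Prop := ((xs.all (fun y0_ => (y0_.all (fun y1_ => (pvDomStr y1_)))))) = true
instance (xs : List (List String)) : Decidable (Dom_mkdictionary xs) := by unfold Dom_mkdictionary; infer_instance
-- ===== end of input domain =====

-- B replaces A's incremental guarded-counter loop by a position-based algorithm (alternative, not faster):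
-- first-occurrence positions via a reversed overwrite load, then sort-by-position and rank.

-- ===== PORT A =====
-- the loop body: 'if word not in dic: dic[word] = _id; _id += 1'
def pvStepA (st : PySem.Dict String Int × Int) (word : String) : PySem.Dict String Int × Int :=
  if st.1.contains word then st else (st.1.insert word st.2, st.2 + 1)

def mkdictionary (xs : List (List String)) : List (String × Int) :=
  let r := xs.foldl (fun st line => line.foldl pvStepA st) ((PySem.Dict.empty : PySem.Dict String Int), (0 : Int))
  r.1.items

-- ===== PORT B =====
def mkdictionary_alt (xs : List (List String)) : List (String × Int) :=
  let flat := xs.flatMap (fun line => line)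
  -- first = dict(reversed([(word, i) for i, word in enumerate(flat)])) : dict(pairs) is a left fold of insert
  let first := (((PySem.List.enumerate flat 0).map (fun p => (p.2, p.1))).reverse).foldl
      (fun d p => d.insert p.1 p.2) (PySem.Dict.empty : PySem.Dict String Int)
  -- order = sorted(first, key=first.get) : every key is present in 'first', so first.get is exactly getD _ 0 here
  let order := PySem.List.sorted first.keys (fun w => first.getD w 0)
  -- {word: rank for rank, word in enumerate(order)} : keys pairwise distinct, so the assoc list is the pair list in order
  (PySem.List.enumerate order 0).map (fun q => (q.2, q.1))

-- ===== PRECONDITION & SPEC =====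
def Spec_mkdictionary (xs : List (List String)) (out : List (String × Int)) : Prop := out = mkdictionary_alt xs
instance (xs : List (List String)) (out : List (String × Int)) : Decidable (Spec_mkdictionary xs out) := by unfold Spec_mkdictionary; infer_instance

-- ===== CLAIM (what is proved, stated in full; the proofs are below) =====
def Claim_equal_mkdictionary : Prop := ∀ (xs : List (List String)), Dom_mkdictionary xs → Spec_mkdictionary xs (mkdictionary xs)

-- ===== LEMMAS AND PROOFS =====

-- the items list 'word ↦ its rank' built from a distinct-word list s
def pvWithIdx (s : List String) : List (String × Int) :=
  (PySem.List.enumerate s 0).map (fun p => (p.2, p.1))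

lemma pvWithIdx_append_singleton (s : List String) (w : String) :
    pvWithIdx (s ++ [w]) = pvWithIdx s ++ [(w, (s.length : Int))] := by
  simp [pvWithIdx, PySem.List.enumerate_append, PySem.List.enumerate]

-- A's fused loop keeps exactly 'seen-so-far words with their ranks'
lemma pvLoop_inv (l s : List String) :
    l.foldl pvStepA (PySem.Dict.mk (pvWithIdx s), (s.length : Int)) =
      (PySem.Dict.mk (pvWithIdx (PySem.Set.update s l)), ((PySem.Set.update s l).length : Int)) := by
  induction l generalizing s with
  | nil => simp [PySem.Set.update]
  | cons w l ih =>
    have hkeys : (PySem.Dict.mk (pvWithIdx s)).keys = s := by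
      simp [pvWithIdx, PySem.Dict.keys_mk, List.map_map, Function.comp_def,
            PySem.List.map_snd_enumerate]
    have hcont : (PySem.Dict.mk (pvWithIdx s)).contains w = PySem.Set.contains s w := by
      rw [PySem.Dict.contains_eq_decide_mem_keys, hkeys]
      simp [PySem.Set.contains]
    by_cases h : PySem.Set.contains s w = true
    · have hm : w ∈ s := by simpa [PySem.Set.contains] using h
      have hupd : (PySem.Set.update s (w :: l)) = PySem.Set.update s l := by
        simp [PySem.Set.update, PySem.Set.add, hm]
      rw [hupd, List.foldl_cons]
      have hstep : pvStepA (PySem.Dict.mk (pvWithIdx s), (s.length : Int)) w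
          = (PySem.Dict.mk (pvWithIdx s), (s.length : Int)) := by
        simp [pvStepA, hcont, PySem.Set.contains, hm]
      rw [hstep, ih]
    · have hm : w ∉ s := by simpa [PySem.Set.contains] using h
      have hnc : (PySem.Dict.mk (pvWithIdx s)).contains w = false := by
        rw [hcont]; simpa [PySem.Set.contains] using h
      have hupd : (PySem.Set.update s (w :: l)) = PySem.Set.update (s ++ [w]) l := by
        simp [PySem.Set.update, PySem.Set.add, hm]
      have hins : (PySem.Dict.mk (pvWithIdx s)).insert w (s.length : Int)
          = PySem.Dict.mk (pvWithIdx (s ++ [w])) := by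
        apply PySem.Dict.ext
        rw [PySem.Dict.items_insert_of_not_contains (h := hnc), pvWithIdx_append_singleton]
      rw [List.foldl_cons]
      have hstep : pvStepA (PySem.Dict.mk (pvWithIdx s), (s.length : Int)) w
          = (PySem.Dict.mk (pvWithIdx (s ++ [w])), ((s ++ [w]).length : Int)) := by
        simp [pvStepA, hcont, PySem.Set.contains, hm, hins]
      rw [hstep, ih, hupd]

-- folding inserts over qs.reverse: the surviving value for k is qs's FIRST pair with key k
lemma pvGet?_foldl_insert_reverse (qs : List (String × Int)) (d : PySem.Dict String Int) (k : String) :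
    ((qs.reverse).foldl (fun d p => d.insert p.1 p.2) d).get? k =
      match qs.find? (fun p => p.1 == k) with
      | some p => some p.2
      | none => d.get? k := by
  induction qs with
  | nil => simp
  | cons q t ih =>
    rw [List.reverse_cons, List.foldl_append, List.foldl_cons, List.foldl_nil,
        PySem.Dict.get?_insert, List.find?_cons]
    by_cases h : k = q.1
    · simp [h]
    · have hb : (q.1 == k) = false := by simp [Ne.symm h]
      simp only [if_neg h, hb]
      exact ih

-- find? over the swapped enumerate of l is the first index of w in l
lemma pvFind?_enumSwap (l : List String) (s : Int) (w : String) :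
    List.find? (fun p => p.1 == w) ((PySem.List.enumerate l s).map (fun p => (p.2, p.1)))
      = if w ∈ l then some (w, s + (l.idxOf w : Int)) else none := by
  induction l generalizing s with
  | nil => simp [PySem.List.enumerate]
  | cons x t ih =>
    rw [PySem.List.enumerate_cons]
    simp only [List.map_cons, List.find?_cons]
    by_cases hx : x = w
    · subst hx
      simp [List.idxOf_cons_self]
    · have hbeq : (x == w) = false := by simp [hx]
      simp only [hbeq]
      rw [ih (s + 1), List.idxOf_cons_ne _ (by simpa using hx)]
      by_cases hm : w ∈ t
      · have hmc : w ∈ x :: t := List.mem_cons_of_mem _ hm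
        simp only [hm, hmc, if_true]
        congr 1
        push_cast
        ring_nf
      · have hnm : w ∉ x :: t := by
          intro hc
          rcases List.mem_cons.mp hc with h1 | h2
          · exact hx h1.symm
          · exact hm h2
        simp [hm, hnm]

-- w ∉ t → (t ++ [w]).idxOf w = t.length  (helper for the lemma above)
lemma pvIdxOf_append_self (t : List String) (w : String) (h : w ∉ t) :
    (t ++ [w]).idxOf w = t.length := by
  induction t with
  | nil => simp
  | cons x r ih =>
    have hx : w ≠ x := by rintro rfl; exact h (by simp)
    simp only [List.cons_append, List.idxOf_cons_ne _ (by simpa using hx.symm)]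
    rw [ih (fun hm => h (by simp [hm]))]; simp

-- first-insertion-order dedup lists words in strictly increasing first-occurrence position
lemma pvPairwise_idxOf_ofList (l : List String) :
    (PySem.Set.ofList l).Pairwise (fun a b => l.idxOf a < l.idxOf b) := by
  induction l using List.reverseRecOn with
  | nil => simp [PySem.Set.ofList]
  | append_singleton t w ih =>
    have hof : PySem.Set.ofList (t ++ [w]) = PySem.Set.add (PySem.Set.ofList t) w := by
      rw [PySem.Set.ofList_eq_foldl, PySem.Set.ofList_eq_foldl, List.foldl_append]
      rfl
    by_cases hm : w ∈ t
    · have hadd : PySem.Set.add (PySem.Set.ofList t) w = PySem.Set.ofList t := by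
        simp [PySem.Set.add, PySem.Set.contains, (PySem.Set.mem_ofList t w).mpr hm]
      rw [hof, hadd]
      refine ih.imp_of_mem ?_
      intro a b ha hb hab
      have ha' : a ∈ t := (PySem.Set.mem_ofList t a).mp ha
      have hb' : b ∈ t := (PySem.Set.mem_ofList t b).mp hb
      rwa [List.idxOf_append_of_mem ha', List.idxOf_append_of_mem hb']
    · have hadd : PySem.Set.add (PySem.Set.ofList t) w = PySem.Set.ofList t ++ [w] := by
        simp [PySem.Set.add, PySem.Set.contains, (PySem.Set.mem_ofList t w), hm]
      rw [hof, hadd, List.pairwise_append]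
      refine ⟨ih.imp_of_mem ?_, by simp, ?_⟩
      · intro a b ha hb hab
        have ha' : a ∈ t := (PySem.Set.mem_ofList t a).mp ha
        have hb' : b ∈ t := (PySem.Set.mem_ofList t b).mp hb
        rwa [List.idxOf_append_of_mem ha', List.idxOf_append_of_mem hb']
      · intro a ha b hb
        have ha' : a ∈ t := (PySem.Set.mem_ofList t a).mp ha
        have hbw : b = w := by simpa using hb
        subst hbw
        rw [List.idxOf_append_of_mem ha', pvIdxOf_append_self t b hm]
        exact List.idxOf_lt_length_of_mem ha'

-- ===== VERDICT (by name: the statement is the Claim_ definition above) =====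
theorem mkdictionary_spec : Claim_equal_mkdictionary := by
  intro xs _
  show mkdictionary xs = mkdictionary_alt xs
  simp only [mkdictionary, mkdictionary_alt]
  set flat : List String := xs.flatMap (fun line => line) with hflatdef
  set qs : List (String × Int) := (PySem.List.enumerate flat 0).map (fun p => (p.2, p.1)) with hqsdef
  set first : PySem.Dict String Int :=
    (qs.reverse).foldl (fun d p => d.insert p.1 p.2) (PySem.Dict.empty : PySem.Dict String Int)
    with hfirstdef
  -- B-side facts about 'first'
  have hget : ∀ w ∈ flat, first.get? w = some ((flat.idxOf w : Nat) : Int) := by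
    intro w hw
    rw [hfirstdef, pvGet?_foldl_insert_reverse, hqsdef, pvFind?_enumSwap, if_pos hw]
    simp
  have hkeys : first.keys = PySem.Set.ofList flat.reverse := by
    have h1 : first.keys = PySem.Set.update (PySem.Dict.empty : PySem.Dict String Int).keys (qs.reverse.map Prod.fst) :=
      PySem.Dict.keys_foldl_insert_key qs.reverse Prod.fst (fun _ p => p.2) _
    have h2 : qs.reverse.map Prod.fst = flat.reverse := by
      rw [List.map_reverse, hqsdef, List.map_map]
      simp [Function.comp_def, PySem.List.map_snd_enumerate]
    rw [h1, h2, PySem.Dict.keys_empty, PySem.Set.ofList_eq_foldl]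
    rfl
  have hmemk : ∀ w, w ∈ first.keys ↔ w ∈ flat := by
    intro w
    rw [hkeys, PySem.Set.mem_ofList, List.mem_reverse]
  have hperm : (PySem.Set.ofList flat).Perm first.keys := by
    rw [List.perm_ext_iff_of_nodup (PySem.Set.nodup_ofList flat) (hkeys ▸ PySem.Set.nodup_ofList flat.reverse)]
    intro a
    rw [PySem.Set.mem_ofList, hmemk]
  have hkeyval : ∀ w ∈ flat, first.getD w 0 = ((flat.idxOf w : Nat) : Int) := by
    intro w hw
    rw [PySem.Dict.getD_eq_get?_getD, hget w hw]
    rfl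
  have hpw : (PySem.Set.ofList flat).Pairwise (fun a b => first.getD a 0 < first.getD b 0) := by
    refine (pvPairwise_idxOf_ofList flat).imp_of_mem ?_
    intro a b ha hb hab
    rw [hkeyval a ((PySem.Set.mem_ofList flat a).mp ha), hkeyval b ((PySem.Set.mem_ofList flat b).mp hb)]
    exact_mod_cast hab
  have horder : PySem.List.sorted first.keys (fun w => first.getD w 0) = PySem.Set.ofList flat :=
    PySem.List.sorted_eq_of_perm_of_pairwise_lt _ _ _ hperm hpw
  -- A-side: the fused loop computes pvWithIdx of the first-insertion-order dedup
  have hAfold : xs.foldl (fun st line => line.foldl pvStepA st)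
        ((PySem.Dict.empty : PySem.Dict String Int), (0 : Int))
      = flat.foldl pvStepA ((PySem.Dict.empty : PySem.Dict String Int), (0 : Int)) := by
    rw [hflatdef, List.flatMap_id', List.foldl_flatten]
  have hempty : ((PySem.Dict.empty : PySem.Dict String Int), (0 : Int))
      = (PySem.Dict.mk (pvWithIdx []), (([] : List String).length : Int)) := by rfl
  have hA : (xs.foldl (fun st line => line.foldl pvStepA st)
        ((PySem.Dict.empty : PySem.Dict String Int), (0 : Int))).1.items
      = pvWithIdx (PySem.Set.ofList flat) := by
    rw [hAfold, hempty, pvLoop_inv]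
    have : PySem.Set.update ([] : List String) flat = PySem.Set.ofList flat := by
      rw [PySem.Set.ofList_eq_foldl]; rfl
    rw [this]
  rw [hA, horder]
  rfl
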